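-- pv_equiv track=rewrite | github.com/andyjiang007/AdventOfCode | 2023/day3/aoc2023_day3.py | findAdjNums
-- ===== SOURCE A (Python) =====
-- def findAdjNums(lines, i, j):
--     result = [(i, j)]
--     index = j - 1
--     while index >= 0 and lines[i][index].isdigit():
--         result = [(i,index)] + result
--         index -= 1
--
--     index = j + 1
--     while index < len(lines[i]) and lines[i][index].isdigit():
--         result.append((i, index))
--         index += 1
--
--     return result
-- ===== SOURCE B (Python) =====
-- def findAdjNums(lines, i, j):
--     line = lines[i]
--     # one pass over the whole line: collect every maximal digit run as (start, end)
--     runs = []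
--     start = None
--     for k in range(len(line)):
--         if line[k].isdigit():
--             if start is None:
--                 start = k
--         else:
--             if start is not None:
--                 runs.append((start, k - 1))
--                 start = None
--     if start is not None:
--         runs.append((start, len(line) - 1))
--     # the answer spans from the run touching j on the left to the run touching j on the right
--     lo, hi = j, j
--     for s, e in runs:
--         if s <= j - 1 <= e:
--             lo = s
--         if s <= j + 1 <= e:
--             hi = e
--     return [(i, c) for c in range(lo, hi + 1)]
-- ===== Notes on version B (the rewrite author's own statement) =====
-- stated objective: alternative
-- what changed: B makes one left-to-right pass over the whole line collecting every maximal digit run as (start,end) pairs, then picks the run touching j-1 and the run touching j+1 from that table and emits the span with a range - instead of A's two index scans outward from j that accumulate pairs with an O(k) list prepend per step.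
-- intended difference: For j <= -2 whose wrapped position len(line)+j+1 holds a digit, A's right scan indexes lines[i][j+1] with a negative index that wraps around to the end of the line and extends the result with wrapped (even negative) column indices, while B returns just [(i, j)]; wraparound columns are an accident of Python indexing, not adjacency, so B's value is the intended one. — e.g. on findAdjNums(["12"], 0, -2): A returns [(0, -2), (0, -1), (0, 0), (0, 1)], B returns [(0, -2)]
import Mathlib
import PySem

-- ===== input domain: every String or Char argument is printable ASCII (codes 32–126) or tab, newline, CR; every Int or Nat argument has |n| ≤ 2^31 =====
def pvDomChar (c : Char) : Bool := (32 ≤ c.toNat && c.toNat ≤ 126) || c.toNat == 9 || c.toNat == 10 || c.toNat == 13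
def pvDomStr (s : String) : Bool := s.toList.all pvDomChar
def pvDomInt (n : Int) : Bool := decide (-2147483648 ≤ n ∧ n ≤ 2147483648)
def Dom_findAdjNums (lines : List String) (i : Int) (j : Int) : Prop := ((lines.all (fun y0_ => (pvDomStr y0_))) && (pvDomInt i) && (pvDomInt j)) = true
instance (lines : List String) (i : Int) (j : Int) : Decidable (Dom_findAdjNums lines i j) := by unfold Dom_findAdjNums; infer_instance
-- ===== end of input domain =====

-- B replaces A's two outward index scans (with an O(k) prepend per left step) by one pass over
-- the whole line that tabulates every maximal digit run, a lookup of the runs touching j-1/j+1,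
-- and a single range emission; return-value equivalence only (neither version mutates arguments).

-- ===== PORT A =====
-- lines[i][index].isdigit() : false stands where Python would raise (excluded by Pre_)
def pvDigitA (lines : List String) (i : Int) (index : Int) : Bool :=
  match PySem.List.pyGet? lines i with
  | none => false
  | some s =>
    match PySem.Str.pyGet? s index with
    | none => false
    | some c => PySem.Chars.isdigit c

-- while index >= 0 and lines[i][index].isdigit(): result = [(i,index)] + result; index -= 1
def pvLeftA (lines : List String) (i : Int) (index : Int) (result : List (Int × Int)) :
    List (Int × Int) :=
  if _h : 0 ≤ index ∧ pvDigitA lines i index = true then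
    pvLeftA lines i (index - 1) ((i, index) :: result)
  else result
termination_by (index + 1).toNat
decreasing_by omega

-- while index < len(lines[i]) and lines[i][index].isdigit(): result.append((i, index)); index += 1
def pvRightA (lines : List String) (i : Int) (n : Int) (index : Int)
    (result : List (Int × Int)) : List (Int × Int) :=
  if h : index < n ∧ pvDigitA lines i index = true then
    pvRightA lines i n (index + 1) (result ++ [(i, index)])
  else result
termination_by (n - index).toNat
decreasing_by omega

def findAdjNums (lines : List String) (i : Int) (j : Int) : List (Int × Int) :=
  -- len(lines[i]); when i is out of range Python raises (excluded by Pre_)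
  let n : Int := (((PySem.List.pyGet? lines i).getD "").toList.length : Int)
  pvRightA lines i n (j + 1) (pvLeftA lines i (j - 1) [(i, j)])

-- ===== PORT B =====
-- for k in range(len(line)): build the list of maximal digit runs (state: runs, start)
def pvRunsLoop (cs : List Char) (k : Int) (runs : List (Int × Int)) (start : Option Int) :
    List (Int × Int) × Option Int :=
  match cs with
  | [] => (runs, start)
  | c :: rest =>
    if PySem.Chars.isdigit c then
      pvRunsLoop rest (k + 1) runs (match start with | none => some k | some s => some s)
    else
      match start with
      | some s => pvRunsLoop rest (k + 1) (runs ++ [(s, k - 1)]) none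
      | none => pvRunsLoop rest (k + 1) runs none

def pvRuns (line : List Char) : List (Int × Int) :=
  match pvRunsLoop line 0 [] none with
  | (runs, none) => runs
  | (runs, some s) => runs ++ [(s, (line.length : Int) - 1)]

-- for s, e in runs: if s <= j-1 <= e: lo = s ; if s <= j+1 <= e: hi = e
def pvBoundsStep (j : Int) (p : Int × Int) (r : Int × Int) : Int × Int :=
  (if r.1 ≤ j - 1 ∧ j - 1 ≤ r.2 then r.1 else p.1,
   if r.1 ≤ j + 1 ∧ j + 1 ≤ r.2 then r.2 else p.2)

def findAdjNums_alt (lines : List String) (i : Int) (j : Int) : List (Int × Int) :=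
  match PySem.List.pyGet? lines i with
  | none => []   -- line = lines[i] raises in Python; excluded by Pre_
  | some line =>
    let runs := pvRuns line.toList
    let lohi := runs.foldl (pvBoundsStep j) (j, j)
    (PySem.List.pyRange lohi.1 (lohi.2 + 1) 1).map (fun c => (i, c))

-- ===== PRECONDITION & SPEC =====
-- Exactly the inputs on which Python A returns: i a valid (possibly negative) index into lines,
-- and j within [-len-1, len] of that line so neither scan indexes out of range.
def Pre_findAdjNums (lines : List String) (i : Int) (j : Int) : Prop :=
  (PySem.List.pyGet? lines i).isSome = true ∧
  -(((PySem.List.pyGet? lines i).getD "").toList.length : Int) - 1 ≤ j ∧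
  j ≤ (((PySem.List.pyGet? lines i).getD "").toList.length : Int)
instance (lines : List String) (i : Int) (j : Int) : Decidable (Pre_findAdjNums lines i j) := by
  unfold Pre_findAdjNums; infer_instance

def pvWitness_findAdjNums : List String × Int × Int := (["4a12", "x9"], 0, 2)

-- position k of L (no wraparound) holds a digit
def digAt (L : List Char) (k : Int) : Bool :=
  if 0 ≤ k then (L[k.toNat]?.map PySem.Chars.isdigit).getD false else false

-- For j ≤ -2 whose wrapped position len+j+1 holds a digit, A's right scan indexes lines[i][j+1]
-- with a negative index that wraps to the end of the line and extends the result with wrapped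
-- (even negative) column indices, while B returns just [(i, j)]; wraparound columns are an
-- accident of Python indexing, not adjacency, so B's value is the intended one.
def D_findAdjNums (lines : List String) (i : Int) (j : Int) : Prop :=
  j ≤ -2 ∧
    (PySem.List.pyGet? lines i).elim false
      (fun s => digAt s.toList ((s.toList.length : Int) + j + 1)) = true
instance (lines : List String) (i : Int) (j : Int) : Decidable (D_findAdjNums lines i j) := by
  unfold D_findAdjNums; infer_instance

def Spec_findAdjNums (lines : List String) (i : Int) (j : Int) (out : List (Int × Int)) : Prop := ¬ D_findAdjNums lines i j → out = findAdjNums_alt lines i j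
instance (lines : List String) (i : Int) (j : Int) (out : List (Int × Int)) : Decidable (Spec_findAdjNums lines i j out) := by unfold Spec_findAdjNums; infer_instance

def pvDiffWitness_findAdjNums : List String × Int × Int := (["12"], 0, -2)
def pvDiffWitnessOut_findAdjNums : (List (Int × Int)) × (List (Int × Int)) :=
  ([(0, -2), (0, -1), (0, 0), (0, 1)], [(0, -2)])

-- ===== CLAIM (what is proved, stated in full; the proofs are below) =====
def Claim_unchanged_findAdjNums : Prop := ∀ (lines : List String) (i : Int) (j : Int), Dom_findAdjNums lines i j → Pre_findAdjNums lines i j → Spec_findAdjNums lines i j (findAdjNums lines i j)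
def Claim_changed_findAdjNums : Prop := Dom_findAdjNums (pvDiffWitness_findAdjNums.1) (pvDiffWitness_findAdjNums.2.1) (pvDiffWitness_findAdjNums.2.2) ∧ Pre_findAdjNums (pvDiffWitness_findAdjNums.1) (pvDiffWitness_findAdjNums.2.1) (pvDiffWitness_findAdjNums.2.2) ∧ D_findAdjNums (pvDiffWitness_findAdjNums.1) (pvDiffWitness_findAdjNums.2.1) (pvDiffWitness_findAdjNums.2.2) ∧ findAdjNums (pvDiffWitness_findAdjNums.1) (pvDiffWitness_findAdjNums.2.1) (pvDiffWitness_findAdjNums.2.2) = pvDiffWitnessOut_findAdjNums.1 ∧ findAdjNums_alt (pvDiffWitness_findAdjNums.1) (pvDiffWitness_findAdjNums.2.1) (pvDiffWitness_findAdjNums.2.2) = pvDiffWitnessOut_findAdjNums.2 ∧ pvDiffWitnessOut_findAdjNums.1 ≠ pvDiffWitnessOut_findAdjNums.2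
def Claim_exact_findAdjNums : Prop := ∀ (lines : List String) (i : Int) (j : Int), Dom_findAdjNums lines i j → Pre_findAdjNums lines i j → D_findAdjNums lines i j → findAdjNums lines i j ≠ findAdjNums_alt lines i j

-- ===== LEMMAS AND PROOFS =====

-- A's per-character test, seen through lines[i] = s (keeps Python's index semantics)
def pvDigitW (s : String) (idx : Int) : Bool :=
  match PySem.Str.pyGet? s idx with
  | none => false
  | some c => PySem.Chars.isdigit c

-- the leftmost/rightmost index of the digit span around j, written as A's scans compute them
def scanL (s : String) (start : Int) : Int :=
  if h : 0 ≤ start - 1 ∧ pvDigitW s (start - 1) = true then scanL s (start - 1)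
  else start
termination_by start.toNat
decreasing_by omega

def scanR (s : String) (e : Int) : Int :=
  if h : e + 1 < (s.toList.length : Int) ∧ pvDigitW s (e + 1) = true then scanR s (e + 1)
  else e
termination_by ((s.toList.length : Int) - e).toNat
decreasing_by omega

-- (s, e) is a maximal digit run of L
def MaxRun (L : List Char) (s e : Int) : Prop :=
  s ≤ e ∧ (∀ k, s ≤ k → k ≤ e → digAt L k = true) ∧
  digAt L (s - 1) = false ∧ digAt L (e + 1) = false

theorem digAt_nonneg {L : List Char} {k : Int} (h : digAt L k = true) : 0 ≤ k := by
  by_contra hk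
  unfold digAt at h
  rw [if_neg hk] at h
  simp at h

theorem digAt_lt_len {L : List Char} {k : Int} (h : digAt L k = true) :
    k < (L.length : Int) := by
  have h0 := digAt_nonneg h
  simp only [digAt, if_pos h0] at h
  by_contra hk
  rw [List.getElem?_eq_none (by omega)] at h
  simp at h

theorem pvDigitA_eq {lines : List String} {i : Int} {s : String}
    (hs : PySem.List.pyGet? lines i = some s) (idx : Int) :
    pvDigitA lines i idx = pvDigitW s idx := by
  simp [pvDigitA, pvDigitW, hs]

theorem pvDigitW_nonneg {s : String} {idx : Int} (h : 0 ≤ idx) :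
    pvDigitW s idx = digAt s.toList idx := by
  simp only [pvDigitW, digAt, if_pos h, PySem.Str.pyGet?_eq,
    PySem.Chars.pyGet?_eq_listPyGet?, PySem.List.pyGet?_of_nonneg s.toList h]
  cases s.toList[idx.toNat]? <;> rfl

theorem pvDigitW_neg {s : String} {idx : Int} (h : idx < 0) :
    pvDigitW s idx = digAt s.toList ((s.toList.length : Int) + idx) := by
  unfold pvDigitW digAt
  simp only [PySem.Str.pyGet?, PySem.Chars.pyGet?, PySem.List.pyGet?, PySem.List.pyIdx?]
  by_cases h2 : -(s.toList.length : Int) ≤ idx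
  · rw [if_neg (by omega), if_pos h2, if_pos (by omega)]
    have hn : s.toList.length - (-idx).toNat = ((s.toList.length : Int) + idx).toNat := by
      omega
    rw [hn]
    show (match s.toList[((s.toList.length : Int) + idx).toNat]? with
          | none => false
          | some c => PySem.Chars.isdigit c) =
        (s.toList[((s.toList.length : Int) + idx).toNat]?.map PySem.Chars.isdigit).getD false
    cases s.toList[((s.toList.length : Int) + idx).toNat]? <;> rfl
  · rw [if_neg (by omega), if_neg h2, if_neg (by omega)]
    rfl

theorem guardL {s : String} (j : Int) :
    (0 ≤ j - 1 ∧ pvDigitW s (j - 1) = true) ↔ digAt s.toList (j - 1) = true := by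
  constructor
  · rintro ⟨h0, hd⟩; rwa [pvDigitW_nonneg h0] at hd
  · intro hd
    have h0 := digAt_nonneg hd
    exact ⟨h0, by rwa [pvDigitW_nonneg h0]⟩

theorem guardR {s : String} {j : Int} (hj : -1 ≤ j) :
    (j + 1 < (s.toList.length : Int) ∧ pvDigitW s (j + 1) = true) ↔
      digAt s.toList (j + 1) = true := by
  constructor
  · rintro ⟨_, hd⟩; rwa [pvDigitW_nonneg (by omega)] at hd
  · intro hd
    exact ⟨digAt_lt_len hd, by rwa [pvDigitW_nonneg (by omega)]⟩

theorem scanL_le (s : String) (start : Int) : scanL s start ≤ start := by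
  unfold scanL
  split
  · exact le_trans (scanL_le s (start - 1)) (by omega)
  · exact le_refl _
termination_by start.toNat
decreasing_by omega

theorem scanR_ge (s : String) (e : Int) : e ≤ scanR s e := by
  unfold scanR
  split
  · exact le_trans (by omega) (scanR_ge s (e + 1))
  · exact le_refl _
termination_by ((s.toList.length : Int) - e).toNat
decreasing_by omega

theorem pvLeftA_eq {lines : List String} {i : Int} {s : String}
    (hs : PySem.List.pyGet? lines i = some s) (start : Int) (result : List (Int × Int)) :
    pvLeftA lines i (start - 1) result =
      (PySem.List.pyRange (scanL s start) start 1).map (fun c => (i, c)) ++ result := by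
  rw [pvLeftA, scanL]
  rw [pvDigitA_eq hs]
  split
  · rename_i h
    have ih := pvLeftA_eq hs (start - 1) ((i, start - 1) :: result)
    have h2 : start - 1 - 1 = (start - 1) - 1 := by ring
    rw [h2] at ih
    rw [ih]
    have hle : scanL s (start - 1) ≤ start - 1 := scanL_le s (start - 1)
    have hr : PySem.List.pyRange (scanL s (start - 1)) start 1 =
        PySem.List.pyRange (scanL s (start - 1)) (start - 1) 1 ++ [start - 1] := by
      have := PySem.List.pyRange_one_succ_right hle
      simpa using this
    rw [hr]
    simp
  · simp [PySem.List.pyRange_one_eq_nil (le_refl start)]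
termination_by start.toNat
decreasing_by omega

theorem pvRightA_eq {lines : List String} {i : Int} {s : String}
    (hs : PySem.List.pyGet? lines i = some s) (e : Int) (result : List (Int × Int)) :
    pvRightA lines i (s.toList.length : Int) (e + 1) result =
      result ++ (PySem.List.pyRange (e + 1) (scanR s e + 1) 1).map (fun c => (i, c)) := by
  rw [pvRightA, scanR]
  rw [pvDigitA_eq hs]
  split
  · rename_i h
    have ih := pvRightA_eq hs (e + 1) (result ++ [(i, e + 1)])
    have h2 : e + 1 + 1 = (e + 1) + 1 := by ring
    rw [h2] at ih
    rw [ih]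
    have hge : e + 1 ≤ scanR s (e + 1) := scanR_ge s (e + 1)
    have hr : PySem.List.pyRange (e + 1) (scanR s (e + 1) + 1) 1 =
        (e + 1) :: PySem.List.pyRange (e + 1 + 1) (scanR s (e + 1) + 1) 1 :=
      PySem.List.pyRange_one_cons (by omega)
    rw [hr]
    simp
  · simp [PySem.List.pyRange_one_eq_nil (le_refl (e + 1))]
termination_by ((s.toList.length : Int) - e).toNat
decreasing_by omega

-- A's result in closed form
theorem findAdjNums_eq_scan {lines : List String} {i : Int} {s : String}
    (hs : PySem.List.pyGet? lines i = some s) (j : Int) :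
    findAdjNums lines i j =
      (PySem.List.pyRange (scanL s j) (scanR s j + 1) 1).map (fun c => (i, c)) := by
  unfold findAdjNums
  rw [hs]
  simp only [Option.getD_some]
  rw [pvLeftA_eq hs j [(i, j)]]
  have hmid : ((PySem.List.pyRange (scanL s j) j 1).map (fun c => (i, c)) ++ [(i, j)]) =
      (PySem.List.pyRange (scanL s j) (j + 1) 1).map (fun c => (i, c)) := by
    rw [PySem.List.pyRange_one_succ_right (scanL_le s j)]
    simp
  rw [hmid, pvRightA_eq hs j]
  rw [← List.map_append,
    ← PySem.List.pyRange_one_append (scanL s j) (j + 1) (scanR s j + 1)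
      (by have := scanL_le s j; omega) (by have := scanR_ge s j; omega)]

-- ---- correctness of pvRuns ----

def runsClose (L : List Char) (p : List (Int × Int) × Option Int) : List (Int × Int) :=
  match p.2 with
  | none => p.1
  | some s => p.1 ++ [(s, (L.length : Int) - 1)]

theorem digAt_eq_getElem (L : List Char) (m : Nat) (h : m < L.length) :
    digAt L (m : Int) = PySem.Chars.isdigit L[m] := by
  simp [digAt, h]

theorem runs_inv (L : List Char) (cs : List Char) :
    ∀ (m : Nat) (runs : List (Int × Int)) (start : Option Int),
    cs = L.drop m →
    (∀ r ∈ runs, MaxRun L r.1 r.2) →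
    (match start with
     | some s => digAt L (s - 1) = false ∧ 0 ≤ s ∧ s < (m : Int) ∧
         (∀ k, s ≤ k → k < (m : Int) → digAt L k = true)
     | none => digAt L ((m : Int) - 1) = false) →
    (∀ k : Int, 0 ≤ k → k < (m : Int) → digAt L k = true →
       (∃ r ∈ runs, r.1 ≤ k ∧ k ≤ r.2) ∨ (∃ s, start = some s ∧ s ≤ k)) →
    (∀ r ∈ runsClose L (pvRunsLoop cs (m : Int) runs start), MaxRun L r.1 r.2) ∧
    (∀ k : Int, digAt L k = true →
       ∃ r ∈ runsClose L (pvRunsLoop cs (m : Int) runs start), r.1 ≤ k ∧ k ≤ r.2) := by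
  induction cs with
  | nil =>
    intro m runs start hm hr hs hc
    have hml : L.length ≤ m := List.drop_eq_nil_iff.mp hm.symm
    simp only [pvRunsLoop]
    constructor
    · intro r hrr
      cases start with
      | none => exact hr r hrr
      | some s0 =>
        simp only [runsClose] at hrr
        rcases List.mem_append.mp hrr with h | h
        · exact hr r h
        · obtain ⟨hl0, hs0, hsm, hall⟩ := hs
          have hds0 : digAt L s0 = true := by
            refine hall s0 le_rfl ?_
            omega
          have hlt : s0 < (L.length : Int) := digAt_lt_len hds0
          simp only [List.mem_singleton] at h
          subst h
          refine ⟨by omega, ?_, hl0, ?_⟩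
          · intro k hk1 hk2
            exact hall k hk1 (by omega)
          · have : ((L.length : Int) - 1 + 1) = (L.length : Int) := by ring
            rw [this]
            unfold digAt
            rw [if_pos (by positivity)]
            rw [List.getElem?_eq_none (by simp)]
            rfl
    · intro k hk
      have h0 := digAt_nonneg hk
      have hlen := digAt_lt_len hk
      rcases hc k h0 (by omega) hk with ⟨r, hrr, hp⟩ | ⟨s0, hst, hsk⟩
      · refine ⟨r, ?_, hp⟩
        cases start <;> simp [runsClose, hrr]
      · subst hst
        exact ⟨(s0, (L.length : Int) - 1), by simp [runsClose], hsk, by omega⟩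
  | cons c rest ih =>
    intro m runs start hm hr hs hc
    have hml : m < L.length := by
      by_contra h
      rw [List.drop_eq_nil_of_le (by omega)] at hm
      simp at hm
    have hdrop : L.drop m = L[m] :: L.drop (m + 1) := List.drop_eq_getElem_cons hml
    rw [hdrop] at hm
    have hc0 : c = L[m] := (List.cons.injEq _ _ _ _ ▸ hm).1
    have hrest : rest = L.drop (m + 1) := (List.cons.injEq _ _ _ _ ▸ hm).2
    have hdig : digAt L (m : Int) = PySem.Chars.isdigit c := by
      rw [digAt_eq_getElem L m hml, hc0]
    have hcast : (m : Int) + 1 = ((m + 1 : Nat) : Int) := by push_cast; ring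
    by_cases hcd : PySem.Chars.isdigit c = true
    · cases start with
      | none =>
        simp only [pvRunsLoop, if_pos hcd]
        rw [hcast]
        refine ih (m + 1) runs (some (m : Int)) hrest hr ?_ ?_
        · refine ⟨by simpa using hs, by omega, by push_cast; omega, ?_⟩
          intro k hk1 hk2
          have : k = (m : Int) := by push_cast at hk2; omega
          rw [this, hdig]; exact hcd
        · intro k hk0 hk1 hkd
          by_cases hkm : k < (m : Int)
          · rcases hc k hk0 hkm hkd with ⟨r, hrr, hp⟩ | ⟨s, hss, _⟩
            · exact Or.inl ⟨r, hrr, hp⟩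
            · simp at hss
          · exact Or.inr ⟨(m : Int), rfl, by omega⟩
      | some s0 =>
        simp only [pvRunsLoop, if_pos hcd]
        rw [hcast]
        obtain ⟨hl0, hs0, hsm, hall⟩ := hs
        refine ih (m + 1) runs (some s0) hrest hr ?_ ?_
        · refine ⟨hl0, hs0, by push_cast; omega, ?_⟩
          intro k hk1 hk2
          by_cases hkm : k < (m : Int)
          · exact hall k hk1 hkm
          · have : k = (m : Int) := by push_cast at hk2; omega
            rw [this, hdig]; exact hcd
        · intro k hk0 hk1 hkd
          by_cases hkm : k < (m : Int)
          · rcases hc k hk0 hkm hkd with ⟨r, hrr, hp⟩ | ⟨s, hss, hsk⟩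
            · exact Or.inl ⟨r, hrr, hp⟩
            · exact Or.inr ⟨s0, rfl, by cases hss; exact hsk⟩
          · exact Or.inr ⟨s0, rfl, by omega⟩
    · have hcdf : PySem.Chars.isdigit c = false := by simpa using hcd
      cases start with
      | none =>
        simp only [pvRunsLoop, hcdf]
        rw [hcast]
        refine ih (m + 1) runs none hrest hr ?_ ?_
        · have : ((m + 1 : Nat) : Int) - 1 = (m : Int) := by push_cast; ring
          simpa [this, hdig] using hcdf
        · intro k hk0 hk1 hkd
          by_cases hkm : k < (m : Int)
          · rcases hc k hk0 hkm hkd with ⟨r, hrr, hp⟩ | ⟨s, hss, _⟩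
            · exact Or.inl ⟨r, hrr, hp⟩
            · simp at hss
          · exfalso
            have : k = (m : Int) := by push_cast at hk1; omega
            rw [this, hdig, hcdf] at hkd
            exact Bool.noConfusion hkd
      | some s0 =>
        simp only [pvRunsLoop, hcdf]
        rw [hcast]
        obtain ⟨hl0, hs0, hsm, hall⟩ := hs
        have hnew : MaxRun L s0 ((m : Int) - 1) := by
          refine ⟨by omega, ?_, hl0, ?_⟩
          · intro k hk1 hk2
            exact hall k hk1 (by omega)
          · have : (m : Int) - 1 + 1 = (m : Int) := by ring
            rw [this, hdig]; exact hcdf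
        refine ih (m + 1) (runs ++ [(s0, (m : Int) - 1)]) none hrest ?_ ?_ ?_
        · intro r hrr
          rcases List.mem_append.mp hrr with h | h
          · exact hr r h
          · simp only [List.mem_singleton] at h
            subst h
            exact hnew
        · have : ((m + 1 : Nat) : Int) - 1 = (m : Int) := by push_cast; ring
          simpa [this, hdig] using hcdf
        · intro k hk0 hk1 hkd
          by_cases hkm : k < (m : Int)
          · rcases hc k hk0 hkm hkd with ⟨r, hrr, hp⟩ | ⟨s, hss, hsk⟩
            · exact Or.inl ⟨r, List.mem_append_left _ hrr, hp⟩
            · refine Or.inl ⟨(s0, (m : Int) - 1), List.mem_append_right _ (by simp), ?_, by omega⟩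
              cases hss; exact hsk
          · exfalso
            have : k = (m : Int) := by push_cast at hk1; omega
            rw [this, hdig, hcdf] at hkd
            exact Bool.noConfusion hkd

theorem pvRuns_eq_close (L : List Char) :
    pvRuns L = runsClose L (pvRunsLoop L ((0 : Nat) : Int) [] none) := by
  unfold pvRuns runsClose
  rcases pvRunsLoop L 0 [] none with ⟨rs, st⟩
  cases st <;> rfl

theorem runs_spec (L : List Char) :
    (∀ r ∈ pvRuns L, MaxRun L r.1 r.2) ∧
    (∀ k : Int, digAt L k = true → ∃ r ∈ pvRuns L, r.1 ≤ k ∧ k ≤ r.2) := by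
  rw [pvRuns_eq_close]
  refine runs_inv L L 0 [] none (by simp) (by simp) ?_ (by intro k _ hk _; omega)
  simp only [Nat.cast_zero, zero_sub]
  unfold digAt
  rw [if_neg (by omega)]

theorem pvRuns_sound {L : List Char} {r : Int × Int} (h : r ∈ pvRuns L) :
    MaxRun L r.1 r.2 := (runs_spec L).1 r h

theorem pvRuns_complete {L : List Char} {k : Int} (h : digAt L k = true) :
    ∃ r ∈ pvRuns L, r.1 ≤ k ∧ k ≤ r.2 := (runs_spec L).2 k h

theorem maxRun_unique {L : List Char} {s e s' e' k : Int}
    (h : MaxRun L s e) (h' : MaxRun L s' e') (hk : s ≤ k ∧ k ≤ e) (hk' : s' ≤ k ∧ k ≤ e') :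
    s = s' ∧ e = e' := by
  obtain ⟨_, hd, hl, hr⟩ := h
  obtain ⟨_, hd', hl', hr'⟩ := h'
  constructor
  · by_contra hne
    rcases lt_or_gt_of_ne hne with hlt | hlt
    · have := hd (s' - 1) (by omega) (by omega); rw [hl'] at this; simp at this
    · have := hd' (s - 1) (by omega) (by omega); rw [hl] at this; simp at this
  · by_contra hne
    rcases lt_or_gt_of_ne hne with hlt | hlt
    · have := hd' (e + 1) (by omega) (by omega); rw [hr] at this; simp at this
    · have := hd (e' + 1) (by omega) (by omega); rw [hr'] at this; simp at this

-- ---- the bounds fold ----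

theorem fold_fst (j : Int) (rs : List (Int × Int)) (p : Int × Int) :
    (rs.foldl (pvBoundsStep j) p).1 =
      rs.foldl (fun a r => if r.1 ≤ j - 1 ∧ j - 1 ≤ r.2 then r.1 else a) p.1 := by
  induction rs generalizing p with
  | nil => rfl
  | cons r rs ih => simp [List.foldl, pvBoundsStep, ih]

theorem fold_snd (j : Int) (rs : List (Int × Int)) (p : Int × Int) :
    (rs.foldl (pvBoundsStep j) p).2 =
      rs.foldl (fun a r => if r.1 ≤ j + 1 ∧ j + 1 ≤ r.2 then r.2 else a) p.2 := by
  induction rs generalizing p with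
  | nil => rfl
  | cons r rs ih => simp [List.foldl, pvBoundsStep, ih]

theorem sel_none {f : Int × Int → Int} {t : Int} (rs : List (Int × Int)) (a : Int)
    (h : ∀ r ∈ rs, ¬(r.1 ≤ t ∧ t ≤ r.2)) :
    rs.foldl (fun a r => if r.1 ≤ t ∧ t ≤ r.2 then f r else a) a = a := by
  induction rs generalizing a with
  | nil => rfl
  | cons r rs ih =>
    simp only [List.foldl]
    rw [if_neg (h r (by simp))]
    exact ih a (fun r hr => h r (by simp [hr]))

theorem sel_keep {f : Int × Int → Int} {t : Int} (rs : List (Int × Int)) (v : Int)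
    (h : ∀ r ∈ rs, r.1 ≤ t ∧ t ≤ r.2 → f r = v) :
    rs.foldl (fun a r => if r.1 ≤ t ∧ t ≤ r.2 then f r else a) v = v := by
  induction rs generalizing v with
  | nil => rfl
  | cons r rs ih =>
    simp only [List.foldl]
    by_cases hc : r.1 ≤ t ∧ t ≤ r.2
    · rw [if_pos hc, h r (by simp) hc]
      exact ih v (fun r hr hp => h r (by simp [hr]) hp)
    · rw [if_neg hc]
      exact ih v (fun r hr hp => h r (by simp [hr]) hp)

theorem sel_unique {f : Int × Int → Int} {t : Int} (rs : List (Int × Int)) (a v : Int)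
    (hmem : ∃ r ∈ rs, r.1 ≤ t ∧ t ≤ r.2)
    (hall : ∀ r ∈ rs, r.1 ≤ t ∧ t ≤ r.2 → f r = v) :
    rs.foldl (fun a r => if r.1 ≤ t ∧ t ≤ r.2 then f r else a) a = v := by
  induction rs generalizing a with
  | nil => simp at hmem
  | cons r rs ih =>
    simp only [List.foldl]
    by_cases hc : r.1 ≤ t ∧ t ≤ r.2
    · rw [if_pos hc, hall r (by simp) hc]
      exact sel_keep rs v (fun r hr hp => hall r (by simp [hr]) hp)
    · rw [if_neg hc]
      obtain ⟨r0, hr0, hp0⟩ := hmem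
      rcases List.mem_cons.mp hr0 with h | h
      · exact absurd (h ▸ hp0) hc
      · exact ih a ⟨r0, h, hp0⟩ (fun r hr hp => hall r (by simp [hr]) hp)

-- scanL reaches the start of the run containing j-1
theorem scanL_nodigit {s : String} {j : Int} (h : digAt s.toList (j - 1) = false) :
    scanL s j = j := by
  rw [scanL, dif_neg]
  rw [guardL]
  simp [h]

theorem scanL_run {s : String} {s0 e0 : Int} (h : MaxRun s.toList s0 e0) :
    ∀ j : Int, s0 ≤ j - 1 → j - 1 ≤ e0 → scanL s j = s0 := by
  intro j h1 h2
  obtain ⟨hse, hd, hl, hr⟩ := h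
  rw [scanL, dif_pos ((guardL j).mpr (hd (j - 1) h1 h2))]
  by_cases hj : j - 1 = s0
  · rw [hj]
    exact scanL_nodigit hl
  · exact scanL_run ⟨hse, hd, hl, hr⟩ (j - 1) (by omega) (by omega)
termination_by j h1 h2 => (j - s0).toNat
decreasing_by omega

theorem scanR_nodigit {s : String} {j : Int} (hj : -1 ≤ j)
    (h : digAt s.toList (j + 1) = false) : scanR s j = j := by
  rw [scanR, dif_neg]
  rw [guardR hj]
  simp [h]

theorem scanR_run {s : String} {s0 e0 : Int} (h : MaxRun s.toList s0 e0) :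
    ∀ j : Int, s0 ≤ j + 1 → j + 1 ≤ e0 → scanR s j = e0 := by
  intro j h1 h2
  obtain ⟨hse, hd, hl, hr⟩ := h
  have hs0 : 0 ≤ s0 := digAt_nonneg (hd s0 le_rfl (by omega))
  rw [scanR, dif_pos ((guardR (by omega)).mpr (hd (j + 1) h1 h2))]
  by_cases hj : j + 1 = e0
  · rw [hj]
    exact scanR_nodigit (by omega) hr
  · exact scanR_run ⟨hse, hd, hl, hr⟩ (j + 1) (by omega) (by omega)
termination_by j h1 h2 => (e0 - j).toNat
decreasing_by omega

theorem lo_eq (s : String) (j : Int) :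
    ((pvRuns s.toList).foldl (pvBoundsStep j) (j, j)).1 = scanL s j := by
  rw [fold_fst]
  by_cases hd : digAt s.toList (j - 1) = true
  · obtain ⟨r0, hr0, hp0⟩ := pvRuns_complete hd
    have hm0 := pvRuns_sound hr0
    refine sel_unique _ _ _ ⟨r0, hr0, hp0⟩ ?_
    intro r hr hp
    have hm := pvRuns_sound hr
    rw [(maxRun_unique hm hm0 hp hp0).1]
    exact (scanL_run hm0 j hp0.1 hp0.2).symm
  · rw [sel_none _ _ (fun r hr hp => hd ((pvRuns_sound hr).2.1 (j - 1) hp.1 hp.2)),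
      scanL_nodigit (by simpa using hd)]

theorem hi_eq (s : String) {j : Int} (hj : -1 ≤ j) :
    ((pvRuns s.toList).foldl (pvBoundsStep j) (j, j)).2 = scanR s j := by
  rw [fold_snd]
  by_cases hd : digAt s.toList (j + 1) = true
  · obtain ⟨r0, hr0, hp0⟩ := pvRuns_complete hd
    have hm0 := pvRuns_sound hr0
    refine sel_unique _ _ _ ⟨r0, hr0, hp0⟩ ?_
    intro r hr hp
    have hm := pvRuns_sound hr
    rw [(maxRun_unique hm hm0 hp hp0).2]
    exact (scanR_run hm0 j hp0.1 hp0.2).symm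
  · rw [sel_none _ _ (fun r hr hp => hd ((pvRuns_sound hr).2.1 (j + 1) hp.1 hp.2)),
      scanR_nodigit hj (by simpa using hd)]

-- B's result in closed form
theorem findAdjNums_alt_eq {lines : List String} {i : Int} {s : String}
    (hs : PySem.List.pyGet? lines i = some s) (j : Int) :
    findAdjNums_alt lines i j =
      (PySem.List.pyRange ((pvRuns s.toList).foldl (pvBoundsStep j) (j, j)).1
        (((pvRuns s.toList).foldl (pvBoundsStep j) (j, j)).2 + 1) 1).map (fun c => (i, c)) := by
  unfold findAdjNums_alt
  rw [hs]

theorem hi_eq_neg {s : String} {j : Int} (hj : j ≤ -2) :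
    ((pvRuns s.toList).foldl (pvBoundsStep j) (j, j)).2 = j := by
  rw [fold_snd]
  refine sel_none _ _ ?_
  intro r hr hp
  have h0 : (0 : Int) ≤ r.1 := digAt_nonneg ((pvRuns_sound hr).2.1 r.1 le_rfl (pvRuns_sound hr).1)
  omega

-- ===== VERDICT (by name: the statement is the Claim_ definition above) =====
theorem findAdjNums_spec : Claim_unchanged_findAdjNums := by
  intro lines i j _ hpre hnd
  obtain ⟨hsome, _, _⟩ := hpre
  obtain ⟨s, hs⟩ := Option.isSome_iff_exists.mp hsome
  rw [findAdjNums_eq_scan hs, findAdjNums_alt_eq hs, lo_eq]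
  by_cases hj : -1 ≤ j
  · rw [hi_eq s hj]
  · have hw : pvDigitW s (j + 1) = false := by
      unfold D_findAdjNums at hnd
      rw [hs] at hnd
      simp only [Option.elim] at hnd
      rw [pvDigitW_neg (by omega)]
      by_contra h
      refine hnd ⟨by omega, ?_⟩
      rw [show (s.toList.length : Int) + j + 1 = (s.toList.length : Int) + (j + 1) by ring]
      simpa using h
    have hscan : scanR s j = j := by
      rw [scanR, dif_neg]
      rintro ⟨_, hd⟩
      rw [hw] at hd
      exact Bool.noConfusion hd
    rw [hscan, hi_eq_neg (by omega)]

theorem findAdjNums_changed : Claim_changed_findAdjNums := by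
  unfold Claim_changed_findAdjNums
  have hs : PySem.List.pyGet? ["12"] 0 = some "12" := by decide
  have hL : scanL "12" (-2) = -2 := scanL_nodigit (by decide)
  have e1 : scanR "12" 1 = 1 := by rw [scanR, dif_neg (by decide)]
  have e0 : scanR "12" 0 = 1 := by
    rw [scanR, dif_pos (by decide)]
    show scanR "12" 1 = 1
    exact e1
  have em1 : scanR "12" (-1) = 1 := by
    rw [scanR, dif_pos (by decide)]
    show scanR "12" 0 = 1
    exact e0
  have em2 : scanR "12" (-2) = 1 := by
    rw [scanR, dif_pos (by decide)]
    show scanR "12" (-1) = 1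
    exact em1
  refine ⟨by decide, by decide, by decide, ?_, by decide, by decide⟩
  show findAdjNums ["12"] 0 (-2) = [(0, -2), (0, -1), (0, 0), (0, 1)]
  rw [findAdjNums_eq_scan hs, hL, em2]
  decide

theorem findAdjNums_tight : Claim_exact_findAdjNums := by
  intro lines i j _ hpre hD
  obtain ⟨hsome, _, _⟩ := hpre
  obtain ⟨s, hs⟩ := Option.isSome_iff_exists.mp hsome
  obtain ⟨hj2, hw⟩ := hD
  rw [hs] at hw
  simp only [Option.elim] at hw
  rw [show (s.toList.length : Int) + j + 1 = (s.toList.length : Int) + (j + 1) by ring] at hw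
  have hdl : digAt s.toList (j - 1) = false := by
    cases h : digAt s.toList (j - 1) with
    | false => rfl
    | true => exact absurd (digAt_nonneg h) (by omega)
  have hlt : j + 1 < (s.toList.length : Int) := by
    have := digAt_nonneg hw
    omega
  have hw' : pvDigitW s (j + 1) = true := by
    rw [pvDigitW_neg (by omega)]
    exact hw
  have hR : j + 1 ≤ scanR s j := by
    rw [scanR, dif_pos ⟨hlt, hw'⟩]
    exact scanR_ge s (j + 1)
  rw [findAdjNums_eq_scan hs, findAdjNums_alt_eq hs, lo_eq, hi_eq_neg hj2,
    scanL_nodigit hdl]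
  rw [PySem.List.pyRange_one_cons (show j < scanR s j + 1 by omega),
    PySem.List.pyRange_one_cons (show j + 1 < scanR s j + 1 by omega)]
  simp [PySem.List.pyRange_one_singleton]
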